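-- pv_equiv track=rewrite | github.com/TPSE25/zotero-rag-assistant | app/llm_annotation.py | _group_contiguous_sentence_ids
-- ===== SOURCE A (Python) =====
-- from typing import Any, List, Optional, Protocol
--
-- def _group_contiguous_sentence_ids(
--         sentence_ids: List[str],
--         sentence_pos: dict[str, int]
-- ) -> List[List[str]]:
--     if not sentence_ids:
--         return []
--
--     ordered = sorted(sentence_ids, key=lambda sid: sentence_pos[sid])
--     groups: List[List[str]] = []
--     current_group: List[str] = [ordered[0]]
--
--     for sid in ordered[1:]:
--         prev_sid = current_group[-1]
--         if sentence_pos[sid] == sentence_pos[prev_sid] + 1: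
--             current_group.append(sid)
--         else:
--             groups.append(current_group)
--             current_group = [sid]
--
--     groups.append(current_group)
--     return groups
-- ===== SOURCE B (Python) =====
-- def _group_contiguous_sentence_ids(sentence_ids, sentence_pos):
--     ordered = sorted(sentence_ids, key=lambda sid: sentence_pos[sid])
--     breaks = [i for i in range(1, len(ordered))
--               if sentence_pos[ordered[i]] != sentence_pos[ordered[i - 1]] + 1]
--     bounds = [0] + breaks + [len(ordered)]
--     return [ordered[a:b] for a, b in zip(bounds, bounds[1:])] if ordered else []
-- ===== Notes on version B (the rewrite author's own statement) =====
-- stated objective: idiomatic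
-- what changed: Replaces A's stateful accumulator loop (groups/current_group with append-or-flush) by computing the list of break indices with a comprehension and slicing the sorted list at those bounds.
import Mathlib
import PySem

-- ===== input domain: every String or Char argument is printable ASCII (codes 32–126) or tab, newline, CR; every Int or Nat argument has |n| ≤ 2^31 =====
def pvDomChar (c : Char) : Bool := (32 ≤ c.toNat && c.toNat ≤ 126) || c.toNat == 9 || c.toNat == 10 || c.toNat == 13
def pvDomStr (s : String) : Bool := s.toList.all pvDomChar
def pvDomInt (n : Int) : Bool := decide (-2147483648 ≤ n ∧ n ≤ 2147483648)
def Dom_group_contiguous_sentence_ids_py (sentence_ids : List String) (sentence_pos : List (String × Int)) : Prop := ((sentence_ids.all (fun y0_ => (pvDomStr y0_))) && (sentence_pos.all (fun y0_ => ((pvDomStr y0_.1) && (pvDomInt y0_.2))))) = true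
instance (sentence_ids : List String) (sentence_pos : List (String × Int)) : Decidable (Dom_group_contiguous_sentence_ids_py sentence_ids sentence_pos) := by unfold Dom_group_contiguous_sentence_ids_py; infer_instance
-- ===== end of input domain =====

-- B replaces A's accumulator loop by computing the break indices with a comprehension and
-- slicing the sorted list at them (idiomatic index/slice decomposition; no speed claim).
-- ===== PORT A =====
-- shared dict lookup sentence_pos[sid]; the default 0 is only reachable outside Pre_
def pvPos (sentence_pos : List (String × Int)) (sid : String) : Int :=
  PySem.Dict.getD (PySem.Dict.mk sentence_pos) sid 0

def group_contiguous_sentence_ids_py (sentence_ids : List String) (sentence_pos : List (String × Int)) : List (List String) :=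
  if sentence_ids = [] then []
  else
    let ordered := PySem.List.sorted sentence_ids (fun sid => pvPos sentence_pos sid) false
    let res := (PySem.List.slice ordered (some 1) none).foldl
      (fun (st : List (List String) × List String) sid =>
        let prev_sid := PySem.List.pyGetD st.2 (-1) ""
        if pvPos sentence_pos sid = pvPos sentence_pos prev_sid + 1 then
          (st.1, st.2 ++ [sid])
        else
          (st.1 ++ [st.2], [sid]))
      (([] : List (List String)), [PySem.List.pyGetD ordered 0 ""])
    res.1 ++ [res.2]

-- ===== PORT B =====
def group_contiguous_sentence_ids_py_alt (sentence_ids : List String) (sentence_pos : List (String × Int)) : List (List String) :=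
  let ordered := PySem.List.sorted sentence_ids (fun sid => pvPos sentence_pos sid) false
  let breaks := (PySem.List.pyRange 1 (PySem.List.len ordered) 1).filter
    (fun i => !(pvPos sentence_pos (PySem.List.pyGetD ordered i "") ==
                pvPos sentence_pos (PySem.List.pyGetD ordered (i - 1) "") + 1))
  let bounds := 0 :: (breaks ++ [PySem.List.len ordered])
  if ordered = [] then []
  else ((bounds.zip (PySem.List.slice bounds (some 1) none)).map
    (fun ab => PySem.List.slice ordered (some ab.1) (some ab.2)))

-- ===== PRECONDITION & SPEC =====
-- Pre_ excludes exactly the inputs where Python A raises KeyError: some sentence id has no entry in sentence_pos.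
def Pre_group_contiguous_sentence_ids_py (sentence_ids : List String) (sentence_pos : List (String × Int)) : Prop :=
  sentence_ids.all (fun sid => PySem.Dict.contains (PySem.Dict.mk sentence_pos) sid) = true
instance (sentence_ids : List String) (sentence_pos : List (String × Int)) : Decidable (Pre_group_contiguous_sentence_ids_py sentence_ids sentence_pos) := by unfold Pre_group_contiguous_sentence_ids_py; infer_instance
def pvWitness_group_contiguous_sentence_ids_py : List String × (List (String × Int)) :=
  (["a", "b", "c"], [("a", 2), ("b", 5), ("c", 3)])

def Spec_group_contiguous_sentence_ids_py (sentence_ids : List String) (sentence_pos : List (String × Int)) (out : List (List String)) : Prop := out = group_contiguous_sentence_ids_py_alt sentence_ids sentence_pos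
instance (sentence_ids : List String) (sentence_pos : List (String × Int)) (out : List (List String)) : Decidable (Spec_group_contiguous_sentence_ids_py sentence_ids sentence_pos out) := by unfold Spec_group_contiguous_sentence_ids_py; infer_instance

-- ===== CLAIM (what is proved, stated in full; the proofs are below) =====
def Claim_equal_group_contiguous_sentence_ids_py : Prop := ∀ (sentence_ids : List String) (sentence_pos : List (String × Int)), Dom_group_contiguous_sentence_ids_py sentence_ids sentence_pos → Pre_group_contiguous_sentence_ids_py sentence_ids sentence_pos → Spec_group_contiguous_sentence_ids_py sentence_ids sentence_pos (group_contiguous_sentence_ids_py sentence_ids sentence_pos)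

-- ===== LEMMAS AND PROOFS =====

-- the common reference function: split a list into maximal runs of key-successive elements
def splitRuns (key : String → Int) : List String → List (List String)
  | [] => []
  | [x] => [[x]]
  | x :: y :: t =>
    if key y = key x + 1 then
      match splitRuns key (y :: t) with
      | [] => [[x]]
      | g :: gs => (x :: g) :: gs
    else [x] :: splitRuns key (y :: t)

lemma splitRuns_ne_nil (key : String → Int) (x : String) (t : List String) :
    splitRuns key (x :: t) ≠ [] := by
  cases t with
  | nil => simp [splitRuns]
  | cons y t =>
    simp only [splitRuns]
    split
    · cases h : splitRuns key (y :: t) <;> simp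
    · simp

-- A-side fold, named
def stepA (key : String → Int) (st : List (List String) × List String) (sid : String) :
    List (List String) × List String :=
  let prev_sid := PySem.List.pyGetD st.2 (-1) ""
  if key sid = key prev_sid + 1 then (st.1, st.2 ++ [sid]) else (st.1 ++ [st.2], [sid])

def runsFrom (key : String → Int) (cur : List String) : List String → List (List String)
  | [] => [cur]
  | s :: t =>
    if key s = key (PySem.List.pyGetD cur (-1) "") + 1 then runsFrom key (cur ++ [s]) t
    else cur :: runsFrom key [s] t

lemma foldA_eq_runsFrom (key : String → Int) (t : List String)
    (gs : List (List String)) (cur : List String) :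
    (t.foldl (stepA key) (gs, cur)).1 ++ [(t.foldl (stepA key) (gs, cur)).2]
      = gs ++ runsFrom key cur t := by
  induction t generalizing gs cur with
  | nil => simp [runsFrom]
  | cons s t ih =>
    simp only [List.foldl_cons, stepA, runsFrom]
    split
    · exact ih gs (cur ++ [s])
    · rw [ih (gs ++ [cur]) [s]]; simp

lemma runsFrom_eq_splitRuns (key : String → Int) (t : List String) (pre : List String) (x : String) :
    runsFrom key (pre ++ [x]) t =
      match splitRuns key (x :: t) with
      | [] => [pre ++ [x]]
      | g :: gs => (pre ++ g) :: gs := by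
  induction t generalizing pre x with
  | nil => simp [runsFrom, splitRuns]
  | cons s t ih =>
    simp only [runsFrom, PySem.List.pyGetD_neg_one_append_singleton]
    obtain ⟨g, gs, hg⟩ : ∃ g gs, splitRuns key (s :: t) = g :: gs := by
      cases h : splitRuns key (s :: t) with
      | nil => exact absurd h (splitRuns_ne_nil key s t)
      | cons a b => exact ⟨a, b, rfl⟩
    by_cases hc : key s = key x + 1
    · rw [if_pos hc]
      have := ih (pre ++ [x]) s
      rw [hg] at this
      rw [this]
      simp only [splitRuns, if_pos hc, hg]
      simp
    · rw [if_neg hc]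
      have := ih [] s
      rw [hg] at this
      rw [show (pre ++ [x]) :: runsFrom key [s] t
            = (pre ++ [x]) :: runsFrom key ([] ++ [s]) t by simp]
      rw [this]
      simp only [splitRuns, if_neg hc, hg]
      simp

-- B-side machinery
def condB (key : String → Int) (xs : List String) (i : Int) : Bool :=
  !(key (PySem.List.pyGetD xs i "") == key (PySem.List.pyGetD xs (i - 1) "") + 1)

def brksB (key : String → Int) (xs : List String) : List Int :=
  (PySem.List.pyRange 1 (PySem.List.len xs) 1).filter (condB key xs)

def resB (key : String → Int) (xs : List String) : List (List String) :=
  ((0 :: (brksB key xs ++ [PySem.List.len xs])).zip (brksB key xs ++ [PySem.List.len xs])).map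
    (fun ab => PySem.List.slice xs (some ab.1) (some ab.2))

lemma pyRange_one_shift (a b : Int) :
    PySem.List.pyRange (a + 1) (b + 1) 1 = (PySem.List.pyRange a b 1).map (· + 1) := by
  rw [PySem.List.pyRange_one, PySem.List.pyRange_one]
  have : (b + 1 - (a + 1)) = b - a := by ring
  rw [this, List.map_map]
  exact List.map_congr_left (fun k _ => by simp; ring)

lemma pyGetD_cons_shift (x : String) (ys : List String) (i : Int) (d : String) (h : 0 ≤ i) :
    PySem.List.pyGetD (x :: ys) (i + 1) d = PySem.List.pyGetD ys i d := by
  obtain ⟨k, rfl⟩ : ∃ k : Nat, i = (k : Int) := ⟨i.toNat, (Int.toNat_of_nonneg h).symm⟩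
  have : ((k : Int) + 1) = ((k + 1 : Nat) : Int) := by push_cast; ring
  rw [this, PySem.List.pyGetD_natCast, PySem.List.pyGetD_natCast]
  simp [List.getD]

lemma slice_cons_shift (x : String) (ys : List String) (a b : Int) (ha : 0 ≤ a) (hb : 0 ≤ b) :
    PySem.List.slice (x :: ys) (some (a + 1)) (some (b + 1)) = PySem.List.slice ys (some a) (some b) := by
  rw [PySem.List.slice_toNat _ (by omega) (by omega), PySem.List.slice_toNat _ ha hb]
  have h1 : (a + 1).toNat = a.toNat + 1 := by omega
  have h2 : (b + 1).toNat = b.toNat + 1 := by omega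
  rw [h1, h2]
  simp

lemma slice_zero_succ (x : String) (ys : List String) (c : Int) (hc : 0 ≤ c) :
    PySem.List.slice (x :: ys) (some 0) (some (c + 1)) = x :: PySem.List.slice ys (some 0) (some c) := by
  rw [PySem.List.slice_toNat _ (by omega) (by omega), PySem.List.slice_toNat _ le_rfl hc]
  have h2 : (c + 1).toNat = c.toNat + 1 := by omega
  simp [h2]

lemma mem_brksB_nonneg (key : String → Int) (xs : List String) {i : Int}
    (h : i ∈ brksB key xs) : 1 ≤ i := by
  unfold brksB at h
  have := List.mem_filter.mp h
  exact (PySem.List.mem_pyRange_one.mp this.1).1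

lemma condB_one (key : String → Int) (x y : String) (t : List String) :
    condB key (x :: y :: t) 1 = !(key y == key x + 1) := by
  unfold condB
  have h1 : PySem.List.pyGetD (x :: y :: t) 1 "" = y := by
    have : (1 : Int) = ((1 : Nat) : Int) := by norm_num
    rw [this, PySem.List.pyGetD_natCast]; rfl
  have h0 : PySem.List.pyGetD (x :: y :: t) (1 - 1) "" = x := by
    norm_num [PySem.List.pyGetD_zero_cons]
  rw [h1, h0]

lemma brksB_cons (key : String → Int) (x y : String) (t : List String) :
    brksB key (x :: y :: t) =
      (if key y = key x + 1 then [] else [1]) ++ (brksB key (y :: t)).map (· + 1) := by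
  unfold brksB
  have hlen : PySem.List.len (x :: y :: t) = ((t.length : Int) + 2) := by
    simp [PySem.List.len_eq]; ring
  have hlen' : PySem.List.len (y :: t) = ((t.length : Int) + 1) := by
    simp [PySem.List.len_eq]
  rw [hlen, hlen']
  rw [PySem.List.pyRange_one_cons (by omega : (1:Int) < (t.length : Int) + 2)]
  have hshift : PySem.List.pyRange (1 + 1) ((t.length : Int) + 2) 1
      = (PySem.List.pyRange 1 ((t.length : Int) + 1) 1).map (· + 1) := by
    have : ((t.length : Int) + 2) = ((t.length : Int) + 1) + 1 := by ring
    rw [this, pyRange_one_shift]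
  rw [List.filter_cons, hshift, List.filter_map]
  have hcond : ∀ i ∈ PySem.List.pyRange 1 ((t.length : Int) + 1) 1,
      (condB key (x :: y :: t) ∘ (· + 1)) i = condB key (y :: t) i := by
    intro i hi
    have hb := PySem.List.mem_pyRange_one.mp hi
    simp only [Function.comp_apply, condB]
    have h1 : PySem.List.pyGetD (x :: y :: t) (i + 1) "" = PySem.List.pyGetD (y :: t) i "" :=
      pyGetD_cons_shift x (y :: t) i "" (by omega)
    have h2 : PySem.List.pyGetD (x :: y :: t) (i + 1 - 1) "" = PySem.List.pyGetD (y :: t) (i - 1) "" := by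
      have : i + 1 - 1 = (i - 1) + 1 := by ring
      rw [this, pyGetD_cons_shift x (y :: t) (i - 1) "" (by omega)]
    rw [h1, h2]
  rw [List.filter_congr hcond]
  rw [condB_one]
  by_cases hc : key y = key x + 1
  · simp only [hc]; simp
  · have hb : (key y == key x + 1) = false := by simp [hc]
    rw [hb, if_neg hc]
    simp

lemma resB_eq_splitRuns (key : String → Int) (t : List String) (x : String) :
    resB key (x :: t) = splitRuns key (x :: t) := by
  induction t generalizing x with
  | nil =>
    unfold resB brksB
    have : PySem.List.len [x] = (1 : Int) := by simp [PySem.List.len_eq]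
    rw [this, PySem.List.pyRange_one_eq_nil le_rfl]
    simp only [List.filter_nil, List.nil_append, List.zip_cons_cons, List.zip_nil_right,
      List.map_cons, List.map_nil]
    rw [show PySem.List.slice [x] (some 0) (some 1)
          = PySem.List.slice [x] (some ((0:Nat):Int)) (some ((1:Nat):Int)) by norm_num]
    rw [PySem.List.slice_natCast]
    simp [splitRuns]
  | cons y t ih =>
    have hlen2 : PySem.List.len (x :: y :: t) = PySem.List.len (y :: t) + 1 := by
      simp [PySem.List.len_eq]
    obtain ⟨c, rest, hB⟩ : ∃ c rest, brksB key (y :: t) ++ [PySem.List.len (y :: t)] = c :: rest := by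
      cases h : brksB key (y :: t) ++ [PySem.List.len (y :: t)] with
      | nil => exact absurd h (by simp)
      | cons a b => exact ⟨a, b, rfl⟩
    have hmemB : ∀ z ∈ (c :: rest : List Int), 0 ≤ z := by
      intro z hz
      rw [← hB] at hz
      rcases List.mem_append.mp hz with h | h
      · have := mem_brksB_nonneg key (y :: t) h; omega
      · simp [PySem.List.len_eq] at h; omega
    unfold resB
    rw [brksB_cons]
    by_cases hc : key y = key x + 1
    · -- contiguous: no break at 1
      rw [if_pos hc]
      simp only [List.nil_append]
      have hmapB : (brksB key (y :: t)).map (· + 1) ++ [PySem.List.len (x :: y :: t)]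
          = ((brksB key (y :: t) ++ [PySem.List.len (y :: t)]).map (· + 1)) := by
        rw [List.map_append, hlen2]; rfl
      rw [hmapB, hB]
      rw [show ((c :: rest).map (· + 1) : List Int) = (c + 1) :: rest.map (· + 1) from rfl]
      rw [List.zip_cons_cons]
      rw [show ((c + 1) :: rest.map (· + 1) : List Int) = (c :: rest).map (· + 1) by simp]
      rw [List.zip_map]
      simp only [List.map_cons, List.map_map]
      have hslices : ∀ p ∈ (c :: rest).zip rest,
          ((fun ab : Int × Int => PySem.List.slice (x :: y :: t) (some ab.1) (some ab.2)) ∘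
              (Prod.map (· + 1) (· + 1))) p
            = PySem.List.slice (y :: t) (some p.1) (some p.2) := by
        intro p hp
        obtain ⟨a, b⟩ := p
        obtain ⟨h1, h2⟩ := List.of_mem_zip hp
        exact slice_cons_shift x (y :: t) a b (hmemB _ h1) (hmemB _ (List.mem_cons_of_mem c h2))
      rw [List.map_congr_left hslices]
      have hhead : PySem.List.slice (x :: y :: t) (some 0) (some (c + 1))
          = x :: PySem.List.slice (y :: t) (some 0) (some c) :=
        slice_zero_succ x (y :: t) c (hmemB c (List.mem_cons_self))
      rw [hhead]
      have hsp : splitRuns key (y :: t) = PySem.List.slice (y :: t) (some 0) (some c)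
          :: ((c :: rest).zip rest).map (fun ab => PySem.List.slice (y :: t) (some ab.1) (some ab.2)) := by
        rw [← ih y]; unfold resB; rw [hB]; simp
      simp only [splitRuns, if_pos hc, hsp]
    · -- break at 1
      rw [if_neg hc]
      have hmapB : ([1] ++ (brksB key (y :: t)).map (· + 1)) ++ [PySem.List.len (x :: y :: t)]
          = 1 :: ((brksB key (y :: t) ++ [PySem.List.len (y :: t)]).map (· + 1)) := by
        rw [List.map_append, hlen2]; simp
      rw [hmapB, hB]
      rw [List.zip_cons_cons]
      rw [show ((1 : Int) :: (c :: rest).map (· + 1)) = ((0 :: c :: rest : List Int).map (· + 1)) by simp]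
      rw [List.zip_map]
      simp only [List.map_cons, List.map_map]
      have hfirst : PySem.List.slice (x :: y :: t) (some 0) (some 1) = [x] := by
        rw [show PySem.List.slice (x :: y :: t) (some 0) (some 1)
              = PySem.List.slice (x :: y :: t) (some ((0:Nat):Int)) (some ((1:Nat):Int)) by norm_num]
        rw [PySem.List.slice_natCast]
        simp
      have hslices : ∀ p ∈ (0 :: c :: rest).zip (c :: rest),
          ((fun ab : Int × Int => PySem.List.slice (x :: y :: t) (some ab.1) (some ab.2)) ∘
              (Prod.map (· + 1) (· + 1))) p
            = PySem.List.slice (y :: t) (some p.1) (some p.2) := by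
        intro p hp
        obtain ⟨a, b⟩ := p
        obtain ⟨h1, h2⟩ := List.of_mem_zip hp
        have hp1 : 0 ≤ a := by
          rcases List.mem_cons.mp h1 with h | h
          · omega
          · exact hmemB _ h
        exact slice_cons_shift x (y :: t) a b hp1 (hmemB _ h2)
      rw [List.map_congr_left hslices, hfirst]
      have hsp : splitRuns key (y :: t)
          = ((0 :: c :: rest).zip (c :: rest)).map
              (fun ab => PySem.List.slice (y :: t) (some ab.1) (some ab.2)) := by
        rw [← ih y]; unfold resB; rw [hB]
      simp only [splitRuns, if_neg hc, hsp]

-- Port A in terms of splitRuns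
lemma portA_eq_splitRuns (sentence_ids : List String) (sentence_pos : List (String × Int))
    (h : sentence_ids ≠ []) :
    group_contiguous_sentence_ids_py sentence_ids sentence_pos
      = splitRuns (pvPos sentence_pos)
          (PySem.List.sorted sentence_ids (fun sid => pvPos sentence_pos sid) false) := by
  unfold group_contiguous_sentence_ids_py
  rw [if_neg h]
  obtain ⟨x, t, hxt⟩ : ∃ x t, PySem.List.sorted sentence_ids (fun sid => pvPos sentence_pos sid) false = x :: t := by
    cases hs : PySem.List.sorted sentence_ids (fun sid => pvPos sentence_pos sid) false with
    | nil => exact absurd ((PySem.List.sorted_eq_nil_iff _ _ _).mp hs) h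
    | cons a b => exact ⟨a, b, rfl⟩
  simp only [hxt]
  rw [PySem.List.slice_from_one]
  simp only [List.tail_cons, PySem.List.pyGetD_zero_cons]
  have hfold := foldA_eq_runsFrom (pvPos sentence_pos) t [] [x]
  have hsame : (t.foldl (stepA (pvPos sentence_pos)) ([], [x]))
      = (t.foldl (fun (st : List (List String) × List String) sid =>
          let prev_sid := PySem.List.pyGetD st.2 (-1) ""
          if pvPos sentence_pos sid = pvPos sentence_pos prev_sid + 1 then (st.1, st.2 ++ [sid])
          else (st.1 ++ [st.2], [sid])) ([], [x])) := rfl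
  rw [← hsame]
  rw [hfold]
  have := runsFrom_eq_splitRuns (pvPos sentence_pos) t [] x
  simp only [List.nil_append] at this
  rw [this]
  obtain ⟨g, gs, hg⟩ : ∃ g gs, splitRuns (pvPos sentence_pos) (x :: t) = g :: gs := by
    cases hsp : splitRuns (pvPos sentence_pos) (x :: t) with
    | nil => exact absurd hsp (splitRuns_ne_nil _ x t)
    | cons a b => exact ⟨a, b, rfl⟩
  rw [hg]
  rfl

-- Port B in terms of splitRuns
lemma portB_eq_splitRuns (sentence_ids : List String) (sentence_pos : List (String × Int)) :
    group_contiguous_sentence_ids_py_alt sentence_ids sentence_pos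
      = splitRuns (pvPos sentence_pos)
          (PySem.List.sorted sentence_ids (fun sid => pvPos sentence_pos sid) false) := by
  unfold group_contiguous_sentence_ids_py_alt
  cases hs : PySem.List.sorted sentence_ids (fun sid => pvPos sentence_pos sid) false with
  | nil => simp [splitRuns]
  | cons x t =>
    rw [if_neg (by simp)]
    rw [PySem.List.slice_from_one]
    simp only [List.tail_cons]
    have : ((0 :: ((PySem.List.pyRange 1 (PySem.List.len (x :: t)) 1).filter
        (fun i => !(pvPos sentence_pos (PySem.List.pyGetD (x :: t) i "") ==
          pvPos sentence_pos (PySem.List.pyGetD (x :: t) (i - 1) "") + 1)) ++ [PySem.List.len (x :: t)])).zip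
        ((PySem.List.pyRange 1 (PySem.List.len (x :: t)) 1).filter
        (fun i => !(pvPos sentence_pos (PySem.List.pyGetD (x :: t) i "") ==
          pvPos sentence_pos (PySem.List.pyGetD (x :: t) (i - 1) "") + 1)) ++ [PySem.List.len (x :: t)])).map
        (fun ab => PySem.List.slice (x :: t) (some ab.1) (some ab.2))
        = resB (pvPos sentence_pos) (x :: t) := rfl
    rw [this]
    exact resB_eq_splitRuns (pvPos sentence_pos) t x

-- ===== VERDICT (by name: the statement is the Claim_ definition above) =====
theorem group_contiguous_sentence_ids_py_spec : Claim_equal_group_contiguous_sentence_ids_py := by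
  intro sentence_ids sentence_pos _ _
  unfold Spec_group_contiguous_sentence_ids_py
  by_cases h : sentence_ids = []
  · subst h
    rfl
  · rw [portA_eq_splitRuns sentence_ids sentence_pos h, portB_eq_splitRuns]
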